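-- pv_equiv track=rewrite | github.com/amit-soni7/academic-writer-agent | backend/services/completion_guard.py | _ends_mid_string
-- ===== SOURCE A (Python) =====
-- def _ends_mid_string(text: str) -> bool:
--     """Return True if text ends inside an open JSON string (unescaped quote count is odd)."""
--     count = 0
--     i = 0
--     while i < len(text):
--         if text[i] == "\\" and i + 1 < len(text):
--             i += 2  # skip the escaped character
--         elif text[i] == '"':
--             count += 1
--             i += 1
--         else:
--             i += 1
--     return count % 2 != 0
-- ===== SOURCE B (Python) =====
-- def _ends_mid_string(text: str) -> bool:
--     """Return True if text ends inside an open JSON string."""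
--     parts = text.split("\\")
--     quotes = parts[0].count('"')
--     consumed = False  # the separator before the current part was itself escaped
--     for part in parts[1:]:
--         if consumed:
--             # this backslash was an escaped character: the part counts fully
--             quotes += part.count('"')
--             consumed = False
--         elif part == "":
--             # the escaped character is the next backslash (or nothing at the end)
--             consumed = True
--         else:
--             # the first character of the part is escaped; count the rest
--             quotes += part[1:].count('"')
--     return quotes % 2 == 1
-- ===== Notes on version B (the rewrite author's own statement) =====
-- stated objective: alternative
-- what changed: Replaced A's index-skipping while loop over characters with a staged pipeline: split the text on backslash with str.split, take the quote count of each fragment with str.count (dropping each fragment's escaped first character, and treating an empty fragment as an escaped backslash that makes the next fragment count in full), and test the parity of the total.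
import Mathlib
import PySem

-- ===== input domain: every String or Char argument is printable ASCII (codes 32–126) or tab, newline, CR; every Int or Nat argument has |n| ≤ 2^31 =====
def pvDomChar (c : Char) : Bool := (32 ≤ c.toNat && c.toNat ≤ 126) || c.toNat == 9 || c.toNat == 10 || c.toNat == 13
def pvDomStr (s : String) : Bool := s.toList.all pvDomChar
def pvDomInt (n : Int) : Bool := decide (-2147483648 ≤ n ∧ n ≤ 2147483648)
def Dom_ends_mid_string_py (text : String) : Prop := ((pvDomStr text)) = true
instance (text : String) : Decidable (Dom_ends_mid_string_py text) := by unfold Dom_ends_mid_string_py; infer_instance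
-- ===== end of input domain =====

-- B replaces A's index-skipping character scan with a staged pass: split on backslash,
-- count quotes per fragment with str.count, dropping each escaped leading character (alternative; same cost).

-- ===== PORT A =====
-- A's while loop over index i: steps by 2 past a backslash when a next char exists,
-- counts quotes, else steps by 1; structurally that is this recursion on the char list.
def pvALoop : List Char → Nat → Nat
  | [], count => count
  | '\\' :: [], count => count                 -- i+1 < len fails; else branch, i += 1, loop ends
  | '\\' :: _ :: rest, count => pvALoop rest count   -- skip the escaped character (i += 2)
  | '"' :: rest, count => pvALoop rest (count + 1)
  | _ :: rest, count => pvALoop rest count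

def ends_mid_string_py (text : String) : Bool :=
  decide (pvALoop text.toList 0 % 2 ≠ 0)

-- ===== PORT B =====
-- Source B's loop body over parts[1:], carrying (quotes, consumed).
def pvBStep (st : Nat × Bool) (part : List Char) : Nat × Bool :=
  if st.2 then (st.1 + PySem.Chars.count part ['"'], false)
  else if part = [] then (st.1, true)
  else (st.1 + PySem.Chars.count (PySem.List.slice part (some 1) none) ['"'], false)

def ends_mid_string_py_alt (text : String) : Bool :=
  let parts := PySem.Chars.splitOn text.toList ['\\']
  let quotes0 := PySem.Chars.count (PySem.List.pyGetD parts 0 []) ['"']  -- parts[0]; split never returns []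
  let st := (PySem.List.slice parts (some 1) none).foldl pvBStep (quotes0, false)
  decide (st.1 % 2 = 1)

-- ===== PRECONDITION & SPEC =====
def Spec_ends_mid_string_py (text : String) (out : Bool) : Prop := out = ends_mid_string_py_alt text
instance (text : String) (out : Bool) : Decidable (Spec_ends_mid_string_py text out) := by unfold Spec_ends_mid_string_py; infer_instance

-- ===== CLAIM (what is proved, stated in full; the proofs are below) =====
def Claim_equal_ends_mid_string_py : Prop := ∀ (text : String), Dom_ends_mid_string_py text → Spec_ends_mid_string_py text (ends_mid_string_py text)

-- ===== LEMMAS AND PROOFS =====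

-- reference splitter: what PySem.Chars.splitOn computes for the one-char separator '\'
def pvSplit : List Char → List (List Char)
  | [] => [[]]
  | c :: rest =>
    if c = '\\' then [] :: pvSplit rest
    else match pvSplit rest with
      | [] => [[c]]
      | h :: t => (c :: h) :: t

theorem pvSplit_ne_nil (l : List Char) : pvSplit l ≠ [] := by
  cases l with
  | nil => simp [pvSplit]
  | cons c rest =>
    simp only [pvSplit]
    split <;> [skip; split] <;> simp

theorem pvCountGo_singleton (q : Char) :
    ∀ (l : List Char) (fuel acc : Nat), l.length ≤ fuel →
      PySem.Chars.count.go [q] fuel l acc = acc + l.count q := by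
  intro l
  induction l with
  | nil => intro fuel acc _; cases fuel <;> simp [PySem.Chars.count.go]
  | cons c rest ih =>
    intro fuel acc hf
    cases fuel with
    | zero => simp at hf
    | succ f =>
      by_cases hc : q = c
      · subst hc
        rw [show PySem.Chars.count.go [q] (f+1) (q :: rest) acc =
              PySem.Chars.count.go [q] f rest (acc + 1) by
            simp [PySem.Chars.count.go, List.isPrefixOf]]
        rw [ih f (acc + 1) (by simpa using hf)]
        simp
        omega
      · rw [show PySem.Chars.count.go [q] (f+1) (c :: rest) acc =
              PySem.Chars.count.go [q] f rest acc by
            simp [PySem.Chars.count.go, List.isPrefixOf, hc]]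
        rw [ih f acc (by simpa using hf)]
        simp [Ne.symm hc]

theorem pvCount_singleton (l : List Char) (q : Char) :
    PySem.Chars.count l [q] = l.count q := by
  simp [PySem.Chars.count, pvCountGo_singleton q l l.length 0 le_rfl]

theorem pvSplitGo (l : List Char) : ∀ (fuel : Nat) (cur : List Char) (acc : List (List Char)),
    l.length ≤ fuel →
    PySem.Chars.splitOn.go ['\\'] fuel l cur acc =
      acc.reverse ++ (pvSplit l).modifyHead (cur.reverse ++ ·) := by
  induction l with
  | nil => intro fuel cur acc _; cases fuel <;> simp [PySem.Chars.splitOn.go, pvSplit]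
  | cons c rest ih =>
    intro fuel cur acc hf
    cases fuel with
    | zero => simp at hf
    | succ f =>
      by_cases hc : c = '\\'
      · subst hc
        rw [show PySem.Chars.splitOn.go ['\\'] (f+1) ('\\' :: rest) cur acc =
              PySem.Chars.splitOn.go ['\\'] f rest [] (cur.reverse :: acc) by
            simp [PySem.Chars.splitOn.go, List.isPrefixOf]]
        rw [ih f [] (cur.reverse :: acc) (by simpa using hf)]
        rcases hsr : pvSplit rest with _ | ⟨h, t⟩
        · exact absurd hsr (pvSplit_ne_nil rest)
        · simp [pvSplit, hsr]
      · rw [show PySem.Chars.splitOn.go ['\\'] (f+1) (c :: rest) cur acc =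
              PySem.Chars.splitOn.go ['\\'] f rest (c :: cur) acc by
            simp [PySem.Chars.splitOn.go, List.isPrefixOf, Ne.symm hc]]
        rw [ih f (c :: cur) acc (by simpa using hf)]
        rcases hsr : pvSplit rest with _ | ⟨h, t⟩
        · exact absurd hsr (pvSplit_ne_nil rest)
        · simp [pvSplit, hc, hsr]

theorem pvSplitOn_eq (l : List Char) : PySem.Chars.splitOn l ['\\'] = pvSplit l := by
  rw [show PySem.Chars.splitOn l ['\\'] = PySem.Chars.splitOn.go ['\\'] (l.length + 1) l [] [] from rfl,
    pvSplitGo l (l.length + 1) [] [] (by omega)]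
  rcases h : pvSplit l with _ | ⟨hd, t⟩
  · exact absurd h (pvSplit_ne_nil l)
  · simp

-- joining the fragments back with '\' between them
def pvJoin : List (List Char) → List Char
  | [] => []
  | [p] => p
  | p :: q :: rest => p ++ '\\' :: pvJoin (q :: rest)

theorem pvJoin_cons_cons (c : Char) (h : List Char) (t : List (List Char)) :
    pvJoin ((c :: h) :: t) = c :: pvJoin (h :: t) := by
  cases t <;> simp [pvJoin]

theorem pvJoin_pvSplit (l : List Char) : pvJoin (pvSplit l) = l := by
  induction l with
  | nil => simp [pvSplit, pvJoin]
  | cons c rest ih =>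
    by_cases hc : c = '\\'
    · subst hc
      rcases h : pvSplit rest with _ | ⟨hd, t⟩
      · exact absurd h (pvSplit_ne_nil rest)
      · rw [show pvSplit ('\\' :: rest) = [] :: hd :: t by simp [pvSplit, h],
            show pvJoin ([] :: hd :: t) = '\\' :: pvJoin (hd :: t) by simp [pvJoin]]
        rw [h] at ih; rw [ih]
    · rcases h : pvSplit rest with _ | ⟨hd, t⟩
      · exact absurd h (pvSplit_ne_nil rest)
      · simp only [pvSplit, if_neg hc, h, pvJoin_cons_cons]
        rw [h] at ih; rw [ih]

theorem pvSplit_no_bs (l : List Char) : ∀ p ∈ pvSplit l, '\\' ∉ p := by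
  induction l with
  | nil => simp [pvSplit]
  | cons c rest ih =>
    rcases h : pvSplit rest with _ | ⟨hd, t⟩
    · exact absurd h (pvSplit_ne_nil rest)
    · by_cases hc : c = '\\'
      · subst hc
        rw [show pvSplit ('\\' :: rest) = [] :: hd :: t by simp [pvSplit, h]]
        intro p hp
        rcases List.mem_cons.mp hp with h' | h'
        · simp [h']
        · exact ih p (h ▸ h')
      · rw [show pvSplit (c :: rest) = (c :: hd) :: t by simp [pvSplit, hc, h]]
        intro p hp
        rcases List.mem_cons.mp hp with h' | h'
        · subst h'
          intro hm
          rcases List.mem_cons.mp hm with h'' | h''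
          · exact hc h''.symm
          · exact ih hd (h ▸ List.mem_cons_self) h''
        · exact ih p (h ▸ List.mem_cons_of_mem _ h')

-- A's loop passes straight through a backslash-free block, counting its quotes
theorem pvALoop_clean (p : List Char) : ∀ (t : List Char) (c : Nat), '\\' ∉ p →
    pvALoop (p ++ t) c = pvALoop t (c + p.count '"') := by
  induction p with
  | nil => intro t c _; simp
  | cons x xs ih =>
    intro t c hx
    have hxs : '\\' ∉ xs := fun h => hx (List.mem_cons_of_mem _ h)
    have hxbs : x ≠ '\\' := fun h => hx (h ▸ List.mem_cons_self)
    by_cases hq : x = '"'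
    · subst hq
      rw [show pvALoop (('"' :: xs) ++ t) c = pvALoop (xs ++ t) (c + 1) from rfl, ih t (c+1) hxs]
      simp; ring_nf
    · have hstep : pvALoop (x :: (xs ++ t)) c = pvALoop (xs ++ t) c := by
        conv_lhs => rw [pvALoop.eq_def]
        split <;> simp_all
      rw [List.cons_append, hstep, ih t c hxs]
      congr 1
      simp [hq]

-- A's behaviour expressed on the fragment list
def pvAParts : List Char → List (List Char) → Nat → Nat
  | p, [], c => c + p.count '"'
  | p, [[]], c => c + p.count '"'
  | p, [] :: q :: rest, c => pvAParts q rest (c + p.count '"')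
  | p, q :: rest, c => pvAParts q.tail rest (c + p.count '"')

-- B's loop body summed over the fragment list
def pvBSum : List (List Char) → Bool → Nat
  | [], _ => 0
  | p :: rest, true => p.count '"' + pvBSum rest false
  | [] :: rest, false => pvBSum rest true
  | p :: rest, false => p.tail.count '"' + pvBSum rest false

theorem pvALoop_join : ∀ (p : List Char) (parts : List (List Char)) (c : Nat),
    '\\' ∉ p → (∀ x ∈ parts, '\\' ∉ x) →
    pvALoop (pvJoin (p :: parts)) c = pvAParts p parts c := by
  intro p parts c
  induction p, parts, c using pvAParts.induct with
  | case1 p c =>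
    intro hp _
    have := pvALoop_clean p [] c hp
    simp only [List.append_nil] at this
    simp [pvJoin, pvAParts, this, pvALoop]
  | case2 p c =>
    intro hp _
    rw [show pvJoin [p, []] = p ++ ['\\'] by simp [pvJoin], pvALoop_clean p ['\\'] c hp]
    simp [pvALoop, pvAParts]
  | case3 p q rest c ih =>
    intro hp hall
    rw [show pvJoin (p :: [] :: q :: rest) = p ++ '\\' :: '\\' :: pvJoin (q :: rest) by
          simp [pvJoin], pvALoop_clean p _ c hp]
    rw [show pvALoop ('\\' :: '\\' :: pvJoin (q :: rest)) (c + p.count '"') =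
          pvALoop (pvJoin (q :: rest)) (c + p.count '"') from rfl]
    rw [ih (hall q (by simp)) (fun x hx => hall x (by simp [hx]))]
    simp [pvAParts]
  | case4 p q rest c h1 h2 ih =>
    intro hp hall
    have hq : q ≠ [] := by
      intro he
      cases rest with
      | nil => exact h1 he rfl
      | cons a b => exact h2 a b he rfl
    obtain ⟨ch, qt, rfl⟩ : ∃ ch qt, q = ch :: qt := by
      cases q with
      | nil => exact absurd rfl hq
      | cons a b => exact ⟨a, b, rfl⟩
    rw [show pvJoin (p :: (ch :: qt) :: rest) = p ++ '\\' :: ch :: pvJoin (qt :: rest) by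
          cases rest <;> simp [pvJoin], pvALoop_clean p _ c hp]
    rw [show pvALoop ('\\' :: ch :: pvJoin (qt :: rest)) (c + p.count '"') =
          pvALoop (pvJoin (qt :: rest)) (c + p.count '"') from rfl]
    have hqt : '\\' ∉ qt := by
      intro hm; exact hall (ch :: qt) (by simp) (List.mem_cons_of_mem _ hm)
    simp only [List.tail_cons] at ih
    rw [ih hqt (fun x hx => hall x (by simp [hx]))]
    rw [show pvAParts p ((ch :: qt) :: rest) c = pvAParts qt rest (c + p.count '"') by
          cases rest <;> rfl]

theorem pvAParts_eq_pvBSum : ∀ (p : List Char) (parts : List (List Char)) (c : Nat),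
    pvAParts p parts c = c + p.count '"' + pvBSum parts false := by
  intro p parts c
  induction p, parts, c using pvAParts.induct with
  | case1 p c => simp [pvAParts, pvBSum]
  | case2 p c => simp [pvAParts, pvBSum]
  | case3 p q rest c ih => simp [pvAParts, pvBSum, ih]; omega
  | case4 p q rest c h1 h2 ih =>
    have hq : q ≠ [] := by
      intro he
      cases rest with
      | nil => exact h1 he rfl
      | cons a b => exact h2 a b he rfl
    obtain ⟨ch, qt, rfl⟩ : ∃ ch qt, q = ch :: qt := by
      cases q with
      | nil => exact absurd rfl hq
      | cons a b => exact ⟨a, b, rfl⟩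
    simp only [List.tail_cons] at ih
    simp [pvAParts, pvBSum, ih]; omega

theorem pvFoldl_pvBStep : ∀ (l : List (List Char)) (q : Nat) (b : Bool),
    (l.foldl pvBStep (q, b)).1 = q + pvBSum l b := by
  intro l
  induction l with
  | nil => intro q b; simp [pvBSum]
  | cons p rest ih =>
    intro q b
    cases b with
    | true =>
      rw [show (p :: rest).foldl pvBStep (q, true) =
            rest.foldl pvBStep (q + PySem.Chars.count p ['"'], false) from rfl]
      rw [ih, pvCount_singleton, pvBSum]
      omega
    | false =>
      by_cases hp : p = []
      · subst hp
        rw [show ([] :: rest).foldl pvBStep (q, false) = rest.foldl pvBStep (q, true) by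
              simp [pvBStep]]
        rw [ih, show pvBSum ([] :: rest) false = pvBSum rest true from rfl]
      · rw [show (p :: rest).foldl pvBStep (q, false) =
              rest.foldl pvBStep
                (q + PySem.Chars.count (PySem.List.slice p (some 1) none) ['"'], false) by
              simp [pvBStep, hp]]
        rw [ih, PySem.List.slice_from_one, pvCount_singleton]
        rw [show pvBSum (p :: rest) false = p.tail.count '"' + pvBSum rest false by
              cases p with
              | nil => exact absurd rfl hp
              | cons a b => rfl]
        omega

-- ===== VERDICT (by name: the statement is the Claim_ definition above) =====
theorem ends_mid_string_py_spec : Claim_equal_ends_mid_string_py := by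
  intro text _
  unfold Spec_ends_mid_string_py ends_mid_string_py ends_mid_string_py_alt
  rcases h : pvSplit text.toList with _ | ⟨hd, t⟩
  · exact absurd h (pvSplit_ne_nil _)
  · rw [pvSplitOn_eq, h]
    show decide (pvALoop text.toList 0 % 2 ≠ 0) =
      decide ((List.foldl pvBStep
        (PySem.Chars.count (PySem.List.pyGetD (hd :: t) 0 []) ['"'], false)
        (PySem.List.slice (hd :: t) (some 1) none)).1 % 2 = 1)
    rw [PySem.List.pyGetD_zero_cons, PySem.List.slice_from_one]
    rw [show (hd :: t).tail = t from rfl, pvFoldl_pvBStep, pvCount_singleton]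
    have hhd : '\\' ∉ hd := pvSplit_no_bs text.toList hd (h ▸ List.mem_cons_self)
    have ht : ∀ x ∈ t, '\\' ∉ x :=
      fun x hx => pvSplit_no_bs text.toList x (h ▸ List.mem_cons_of_mem _ hx)
    rw [show text.toList = pvJoin (hd :: t) by rw [← h, pvJoin_pvSplit]]
    rw [pvALoop_join hd t 0 hhd ht, pvAParts_eq_pvBSum]
    simp only [Nat.zero_add, decide_eq_decide]
    omega
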